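-- pv_equiv track=rewrite | github.com/simensandhaug/TDT4120 | exercise_3/largest_cuboid.py | bruteforce_largest_cuboid
-- ===== SOURCE A (Python) =====
-- def bruteforce_largest_cuboid(x):
--     A = 0
--     for B in range(len(x)):
--         for C in range(len(x[0])):
--             for D in range(B, len(x)):
--                 for E in range(C, len(x[0])):
--                     h = min(min(y[C:E + 1]) for y in x[B:D+1])
--                     A = max(A, (D - B + 1) * (E - C + 1) * h)
--     return A
-- ===== SOURCE B (Python) =====
-- def bruteforce_largest_cuboid(x):
--     best = 0
--     n = len(x)
--     for B in range(n):
--         m = len(x[0])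
--         for C in range(m):
--             cur = []  # cur[k] = min of x[r][j] for B <= r <= D, C <= j <= C+k
--             for D in range(B, n):
--                 row = x[D]
--                 run = []  # running minima of row[C:m]
--                 acc = 0
--                 for j in range(C, m):
--                     acc = row[j] if j == C else min(acc, row[j])
--                     run.append(acc)
--                 cur = run if D == B else [min(a, b) for a, b in zip(cur, run)]
--                 height = D - B + 1
--                 for k in range(len(cur)):
--                     best = max(best, height * (k + 1) * cur[k])
--     return best
-- ===== Notes on version B (the rewrite author's own statement) =====
-- stated objective: faster
-- what changed: Instead of recomputing the minimum of every sub-rectangle from slices (A), B fixes a top row and a left column and sweeps the bottom row once, maintaining running column-band minima (a zip-min of per-row running minima), so each candidate rectangle costs O(1) instead of O(nm).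
import Mathlib
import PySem

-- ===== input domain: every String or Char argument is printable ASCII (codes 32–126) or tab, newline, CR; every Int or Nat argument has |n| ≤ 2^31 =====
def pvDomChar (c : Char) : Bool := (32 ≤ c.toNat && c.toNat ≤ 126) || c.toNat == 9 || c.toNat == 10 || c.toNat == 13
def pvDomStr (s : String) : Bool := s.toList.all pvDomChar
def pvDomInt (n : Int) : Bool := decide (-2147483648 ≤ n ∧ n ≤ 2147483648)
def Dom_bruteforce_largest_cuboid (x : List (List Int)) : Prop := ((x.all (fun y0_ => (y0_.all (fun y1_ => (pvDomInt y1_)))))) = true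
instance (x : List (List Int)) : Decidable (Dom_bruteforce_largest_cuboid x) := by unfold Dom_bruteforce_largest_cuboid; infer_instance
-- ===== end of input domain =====

-- B replaces A's per-rectangle slice-and-min recomputation by incremental running
-- column-band minima per (top row, left column) pair: an asymptotically faster exact
-- re-implementation (measured faster in a timing run).

-- ===== PORT A =====
def bruteforce_largest_cuboid (x : List (List Int)) : Int :=
  (PySem.List.pyRange 0 (x.length : Int) 1).foldl (fun A B =>
    (PySem.List.pyRange 0 ((PySem.List.pyGetD x 0 []).length : Int) 1).foldl (fun A C =>
      (PySem.List.pyRange B (x.length : Int) 1).foldl (fun A D =>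
        (PySem.List.pyRange C ((PySem.List.pyGetD x 0 []).length : Int) 1).foldl (fun A E =>
          let h := ((PySem.List.min? ((PySem.List.slice x (some B) (some (D+1))).map
                      (fun y => (PySem.List.min? (PySem.List.slice y (some C) (some (E+1))) (fun v => v)).getD 0))
                      (fun v => v)).getD 0)
          max A ((D - B + 1) * (E - C + 1) * h)) A) A) A) 0

-- ===== PORT B =====
def bruteforce_largest_cuboid_alt (x : List (List Int)) : Int :=
  let n : Int := (x.length : Int)
  (PySem.List.pyRange 0 n 1).foldl (fun best B =>
    let m : Int := ((PySem.List.pyGetD x 0 []).length : Int)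
    (PySem.List.pyRange 0 m 1).foldl (fun best C =>
      ((PySem.List.pyRange B n 1).foldl (fun (s : Int × List Int) D =>
        let row := PySem.List.pyGetD x D []
        let rr := (PySem.List.pyRange C m 1).foldl (fun (p : List Int × Int) j =>
            let acc := if j == C then PySem.List.pyGetD row j 0
                       else min p.2 (PySem.List.pyGetD row j 0)
            (p.1 ++ [acc], acc)) ([], 0)
        let cur := if D == B then rr.1 else (s.2.zip rr.1).map (fun ab => min ab.1 ab.2)
        let height := D - B + 1
        let best := (PySem.List.pyRange 0 (cur.length : Int) 1).foldl (fun best k =>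
            max best (height * (k + 1) * PySem.List.pyGetD cur k 0)) s.1
        (best, cur)) (best, [])).1) best) 0

-- ===== PRECONDITION & SPEC =====
-- Pre_ excludes exactly the ragged matrices in which some row is shorter than row 0:
-- there A raises ValueError (min of an empty slice); it admits every input A returns on.
def Pre_bruteforce_largest_cuboid (x : List (List Int)) : Prop :=
  ∀ y ∈ x, (x.headD []).length ≤ y.length
instance (x : List (List Int)) : Decidable (Pre_bruteforce_largest_cuboid x) := by
  unfold Pre_bruteforce_largest_cuboid; infer_instance

def pvWitness_bruteforce_largest_cuboid : List (List Int) := [[1, 2, -3], [4, -5, 6], [7, 8, 2]]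

def Spec_bruteforce_largest_cuboid (x : List (List Int)) (out : Int) : Prop := out = bruteforce_largest_cuboid_alt x
instance (x : List (List Int)) (out : Int) : Decidable (Spec_bruteforce_largest_cuboid x out) := by unfold Spec_bruteforce_largest_cuboid; infer_instance

-- ===== CLAIM (what is proved, stated in full; the proofs are below) =====
def Claim_equal_bruteforce_largest_cuboid : Prop := ∀ (x : List (List Int)), Dom_bruteforce_largest_cuboid x → Pre_bruteforce_largest_cuboid x → Spec_bruteforce_largest_cuboid x (bruteforce_largest_cuboid x)

-- ===== LEMMAS AND PROOFS =====

-- min(l) for nonempty l, 0 for empty: the total value of Python's min on the lists both ports build.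
def myMin : List Int → Int
  | [] => 0
  | a :: t => t.foldl min a

-- minimum of row[c:c+k+1]
def segMin (row : List Int) (c k : Nat) : Int := myMin ((row.drop c).take (k+1))

-- minimum of the sub-rectangle rows b..d, columns c..c+k
def bandMin (x : List (List Int)) (b d c k : Nat) : Int :=
  myMin (((x.drop b).take (d+1-b)).map (fun y => segMin y c k))

-- the value of B's `cur` after processing rows b..d (left column c, row width M)
def curSpec (x : List (List Int)) (b d c M : Nat) : List Int :=
  (List.range (M - c)).map (fun k => bandMin x b d c k)

lemma minGetD (l : List Int) : (PySem.List.min? l (fun v => v)).getD 0 = myMin l := by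
  cases l with
  | nil => rw [(PySem.List.min?_eq_none_iff _ _).2 rfl]; rfl
  | cons a t => rw [PySem.List.min?_id_cons]; rfl

lemma myMin_append_singleton (l : List Int) (hl : l ≠ []) (a : Int) :
    myMin (l ++ [a]) = min (myMin l) a := by
  cases l with
  | nil => exact absurd rfl hl
  | cons x t => simp [myMin, List.foldl_append]

lemma pyGetD_zero_headD (x : List (List Int)) : PySem.List.pyGetD x 0 [] = x.headD [] := by
  cases x <;> simp [pysem]

lemma drop_take_one {α : Type} (row : List α) (c : Nat) (h : c < row.length) :
    (row.drop c).take 1 = [row[c]] := by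
  rw [List.take_one]
  simp [List.head?_drop, List.getElem?_eq_getElem h]

lemma drop_take_succ {α : Type} (row : List α) (c t : Nat) (h : c + t < row.length) :
    (row.drop c).take (t+1) = (row.drop c).take t ++ [row[c+t]] := by
  rw [List.take_add_one]
  simp [List.getElem?_drop, List.getElem?_eq_getElem h]

lemma segMin_succ (row : List Int) (c t : Nat) (ht : t ≠ 0) (h : c + t < row.length) :
    segMin row c t = min (segMin row c (t-1)) row[c+t] := by
  have h1 : (t - 1) + 1 = t := by omega
  have hne : (row.drop c).take t ≠ [] := by
    intro hnil
    have := congrArg List.length hnil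
    simp at this
    omega
  unfold segMin
  rw [drop_take_succ row c t h, myMin_append_singleton _ hne, h1]

lemma runFold (row : List Int) (c t : Nat) (hM : c + t ≤ row.length) :
    (PySem.List.pyRange (c : Int) ((c : Int) + (t : Int)) 1).foldl
      (fun (p : List Int × Int) j =>
        let acc := if j == (c : Int) then PySem.List.pyGetD row j 0
                   else min p.2 (PySem.List.pyGetD row j 0)
        (p.1 ++ [acc], acc)) ([], 0)
    = ((List.range t).map (fun k => segMin row c k),
       if t = 0 then 0 else segMin row c (t - 1)) := by
  induction t with
  | zero =>
    rw [PySem.List.pyRange_one_eq_nil (by simp)]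
    rfl
  | succ t ih =>
    have hct : c + t < row.length := by omega
    have hcast : (c : Int) + ((t:Nat)+1 : Nat) = ((c:Int) + (t:Int)) + 1 := by push_cast; ring
    rw [hcast, PySem.List.pyRange_one_succ_right (by omega), List.foldl_append,
        ih (by omega)]
    show ((((List.range t).map fun k => segMin row c k) ++
      [if ((c:Int)+(t:Int)) == (c:Int) then PySem.List.pyGetD row ((c:Int)+(t:Int)) 0
       else min (if t = 0 then 0 else segMin row c (t-1)) (PySem.List.pyGetD row ((c:Int)+(t:Int)) 0)], _) : List Int × Int) = _
    have hrowget : PySem.List.pyGetD row ((c:Int)+(t:Int)) 0 = row[c+t] := by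
      rw [show ((c:Int)+(t:Int)) = ((c+t : Nat) : Int) from by push_cast; ring,
          PySem.List.pyGetD_natCast, List.getD_eq_getElem?_getD, List.getElem?_eq_getElem hct]
      rfl
    by_cases ht : t = 0
    · subst ht
      have hbeq : (((c:Int)+(0:Nat)) == (c:Int)) = true := by simp
      have hg : PySem.List.pyGetD row (↑c) 0 = row[c] := by
        rw [PySem.List.pyGetD_natCast, List.getD_eq_getElem?_getD,
            List.getElem?_eq_getElem (by omega : c < row.length)]
        rfl
      have hs : segMin row c 0 = row[c] := by
        simp [segMin, drop_take_one row c (by omega), myMin]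
      simp [hg, hs, List.range_succ]
    · have hbeq : (((c:Int)+(t:Int)) == (c:Int)) = false := by simp; omega
      rw [hbeq]
      simp only [if_neg ht, Bool.false_eq_true, if_false, hrowget]
      have hseg : min (segMin row c (t-1)) row[c+t] = segMin row c t :=
        (segMin_succ row c t ht hct).symm
      rw [hseg]
      simp [List.range_succ]

lemma getD_eq_getElem' {α : Type} (l : List α) (i : Nat) (d : α) (h : i < l.length) :
    l.getD i d = l[i] := by
  rw [List.getD_eq_getElem?_getD, List.getElem?_eq_getElem h]
  rfl

lemma bandMin_base (x : List (List Int)) (b c k : Nat) (hb : b < x.length) :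
    bandMin x b b c k = segMin (x.getD b []) c k := by
  unfold bandMin
  rw [show b + 1 - b = 0 + 1 from by omega, drop_take_one x b hb, getD_eq_getElem' x b [] hb]
  simp [myMin]

lemma bandMin_succ (x : List (List Int)) (b d0 c k : Nat) (hbd : b < d0) (hd : d0 < x.length) :
    bandMin x b d0 c k = min (bandMin x b (d0-1) c k) (segMin (x.getD d0 []) c k) := by
  have h1 : d0 + 1 - b = (d0 - b) + 1 := by omega
  have h2 : (d0 - 1) + 1 - b = d0 - b := by omega
  have h3 : b + (d0 - b) = d0 := by omega
  have hne : ((x.drop b).take (d0 - b)).map (fun y => segMin y c k) ≠ [] := by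
    intro hnil
    have := congrArg List.length hnil
    simp at this
    omega
  unfold bandMin
  rw [h1, h2, drop_take_succ x b (d0 - b) (by omega)]
  simp only [h3]
  rw [List.map_append, List.map_cons, List.map_nil, myMin_append_singleton _ hne,
      getD_eq_getElem' x d0 [] hd]

lemma curSpec_step (x : List (List Int)) (b d0 c M : Nat) (hbd : b < d0) (hd : d0 < x.length) :
    ((curSpec x b (d0-1) c M).zip ((List.range (M-c)).map (fun k => segMin (x.getD d0 []) c k))).map
        (fun ab => min ab.1 ab.2)
      = curSpec x b d0 c M := by
  unfold curSpec
  rw [List.zip_map', List.map_map]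
  apply List.map_congr_left
  intro k _
  exact (bandMin_succ x b d0 c k hbd hd).symm

lemma hA_eq (x : List (List Int)) (b c d0 k : Nat) :
    ((PySem.List.min? ((PySem.List.slice x (some (b:Int)) (some ((d0:Int)+1))).map
       (fun y => (PySem.List.min? (PySem.List.slice y (some (c:Int)) (some (((c:Int)+(k:Int))+1))) (fun v => v)).getD 0))
       (fun v => v)).getD 0)
    = bandMin x b d0 c k := by
  have h1 : (d0:Int)+1 = ((d0+1 : Nat) : Int) := by push_cast; ring
  have h2 : (c:Int)+(k:Int)+1 = (c:Int) + ((k+1 : Nat):Int) := by push_cast; ring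
  rw [h1, PySem.List.slice_natCast]
  simp only [h2, PySem.List.slice_natCast_add, minGetD]
  rfl

lemma bestLoop (x : List (List Int)) (b c d0 M : Nat) (s1 : Int) :
    (PySem.List.pyRange 0 (((curSpec x b d0 c M).length : Nat) : Int) 1).foldl
      (fun best k => max best ((((d0:Int)) - (b:Int) + 1) * (k + 1) * PySem.List.pyGetD (curSpec x b d0 c M) k 0)) s1
    = (PySem.List.pyRange (c:Int) (M:Int) 1).foldl (fun A E =>
        let h := ((PySem.List.min? ((PySem.List.slice x (some (b:Int)) (some (((d0:Int))+1))).map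
                    (fun y => (PySem.List.min? (PySem.List.slice y (some (c:Int)) (some (E+1))) (fun v => v)).getD 0))
                    (fun v => v)).getD 0)
        max A (((d0:Int) - (b:Int) + 1) * (E - (c:Int) + 1) * h)) s1 := by
  have hlen : (curSpec x b d0 c M).length = M - c := by simp [curSpec]
  rw [hlen, PySem.List.pyRange_zero_nat, PySem.List.pyRange_one, List.foldl_map, List.foldl_map,
      show ((M:Int) - (c:Int)).toNat = M - c from by omega]
  apply PySem.List.foldl_congr_mem
  intro acc k hk
  rw [List.mem_range] at hk
  have hget : PySem.List.pyGetD (curSpec x b d0 c M) (k : Int) 0 = bandMin x b d0 c k := by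
    rw [PySem.List.pyGetD_natCast]
    unfold curSpec
    exact PySem.List.getD_map_range _ _ _ _ hk
  show max acc ((((d0:Int)) - (b:Int) + 1) * ((k:Int) + 1) * PySem.List.pyGetD (curSpec x b d0 c M) (k:Int) 0) = _
  rw [hget, show ((c:Int) + (k:Int)) - (c:Int) + 1 = (k:Int) + 1 from by ring,
      show ((c:Int) + (k:Int)) + 1 = ((c:Int)+(k:Int))+1 from rfl, hA_eq x b c d0 k]

lemma loopD (x : List (List Int)) (M : Nat) (hrows : ∀ y ∈ x, M ≤ y.length)
    (b c : Nat) (hb : b < x.length) (hc : c < M) :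
    ∀ (t d0 : Nat), x.length ≤ d0 + t → b ≤ d0 →
    ∀ (best : Int) (cur : List Int),
    (d0 = b ∨ (b < d0 ∧ cur = curSpec x b (d0-1) c M)) →
    ((PySem.List.pyRange (d0:Int) (x.length : Int) 1).foldl (fun (s : Int × List Int) D =>
        let row := PySem.List.pyGetD x D []
        let rr := (PySem.List.pyRange (c:Int) (M:Int) 1).foldl (fun (p : List Int × Int) j =>
            let acc := if j == (c:Int) then PySem.List.pyGetD row j 0
                       else min p.2 (PySem.List.pyGetD row j 0)
            (p.1 ++ [acc], acc)) ([], 0)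
        let cur := if D == (b:Int) then rr.1 else (s.2.zip rr.1).map (fun ab => min ab.1 ab.2)
        let height := D - (b:Int) + 1
        let best := (PySem.List.pyRange 0 (cur.length : Int) 1).foldl (fun best k =>
            max best (height * (k + 1) * PySem.List.pyGetD cur k 0)) s.1
        (best, cur)) (best, cur)).1
    = (PySem.List.pyRange (d0:Int) (x.length : Int) 1).foldl (fun A D =>
        (PySem.List.pyRange (c:Int) (M:Int) 1).foldl (fun A E =>
          let h := ((PySem.List.min? ((PySem.List.slice x (some (b:Int)) (some (D+1))).map
                      (fun y => (PySem.List.min? (PySem.List.slice y (some (c:Int)) (some (E+1))) (fun v => v)).getD 0))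
                      (fun v => v)).getD 0)
          max A ((D - (b:Int) + 1) * (E - (c:Int) + 1) * h)) A) best := by
  intro t
  induction t with
  | zero =>
    intro d0 hlen _ best cur _
    rw [PySem.List.pyRange_one_eq_nil (show (x.length:Int) ≤ (d0:Int) by exact_mod_cast hlen)]
    rfl
  | succ t ih =>
    intro d0 hlen hbd best cur hinv
    by_cases hdn : x.length ≤ d0
    · rw [PySem.List.pyRange_one_eq_nil (show (x.length:Int) ≤ (d0:Int) by exact_mod_cast hdn)]
      rfl
    · have hd : d0 < x.length := by omega
      rw [PySem.List.pyRange_one_cons (show (d0:Int) < (x.length:Int) by exact_mod_cast hd), List.foldl_cons, List.foldl_cons]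
      -- evaluate one iteration of both loops at D = d0
      have hrowmem : x.getD d0 [] ∈ x := by
        rw [getD_eq_getElem' x d0 [] hd]
        exact List.getElem_mem hd
      have hrowlen : M ≤ (x.getD d0 []).length := hrows _ hrowmem
      have hrowD : PySem.List.pyGetD x (d0 : Int) [] = x.getD d0 [] :=
        PySem.List.pyGetD_natCast x d0 []
      have hMsplit : ((M:Nat) : Int) = (c : Int) + ((M - c : Nat) : Int) := by omega
      have hrun : (PySem.List.pyRange (c:Int) (M:Int) 1).foldl (fun (p : List Int × Int) j =>
            let acc := if j == (c:Int) then PySem.List.pyGetD (x.getD d0 []) j 0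
                       else min p.2 (PySem.List.pyGetD (x.getD d0 []) j 0)
            (p.1 ++ [acc], acc)) ([], 0)
          = ((List.range (M-c)).map (fun k => segMin (x.getD d0 []) c k),
             if M - c = 0 then 0 else segMin (x.getD d0 []) c (M - c - 1)) := by
        rw [hMsplit]
        exact runFold (x.getD d0 []) c (M - c) (by omega)
      have hcur : (if ((d0:Int) == (b:Int)) = true then
            ((List.range (M-c)).map (fun k => segMin (x.getD d0 []) c k))
          else (cur.zip ((List.range (M-c)).map (fun k => segMin (x.getD d0 []) c k))).map
            (fun ab => min ab.1 ab.2))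
          = curSpec x b d0 c M := by
        by_cases hdb : d0 = b
        · subst hdb
          simp only [beq_self_eq_true, if_true]
          unfold curSpec
          apply List.map_congr_left
          intro k _
          exact (bandMin_base x d0 c k hd).symm
        · have hblt : b < d0 := by omega
          have hbeq : ((d0:Int) == (b:Int)) = false := by simp; omega
          rw [hbeq]
          simp only [Bool.false_eq_true, if_false]
          rcases hinv with h | ⟨_, hcurev⟩
          · omega
          · rw [hcurev]
            exact curSpec_step x b d0 c M hblt hd
      have hone : ((d0:Int) + 1) = ((d0 + 1 : Nat) : Int) := by push_cast; ring
      rw [hone]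
      have hbl := bestLoop x b c d0 M best
      have hB : (let row := PySem.List.pyGetD x (d0:Int) []
          let rr := (PySem.List.pyRange (c:Int) (M:Int) 1).foldl (fun (p : List Int × Int) j =>
              let acc := if j == (c:Int) then PySem.List.pyGetD row j 0
                         else min p.2 (PySem.List.pyGetD row j 0)
              (p.1 ++ [acc], acc)) ([], 0)
          let cur2 := if (d0:Int) == (b:Int) then rr.1 else ((((best, cur) : Int × List Int)).2.zip rr.1).map (fun ab => min ab.1 ab.2)
          let height := (d0:Int) - (b:Int) + 1
          let best2 := (PySem.List.pyRange 0 (cur2.length : Int) 1).foldl (fun best k =>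
              max best (height * (k + 1) * PySem.List.pyGetD cur2 k 0)) ((((best, cur) : Int × List Int)).1)
          ((best2, cur2) : Int × List Int))
          = ((PySem.List.pyRange (c:Int) (M:Int) 1).foldl (fun A E =>
              let h := ((PySem.List.min? ((PySem.List.slice x (some (b:Int)) (some ((d0:Int)+1))).map
                          (fun y => (PySem.List.min? (PySem.List.slice y (some (c:Int)) (some (E+1))) (fun v => v)).getD 0))
                          (fun v => v)).getD 0)
              max A (((d0:Int) - (b:Int) + 1) * (E - (c:Int) + 1) * h)) best,
             curSpec x b d0 c M) := by
        dsimp only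
        rw [hrowD, hrun]
        dsimp only
        rw [hcur]
        exact congrArg (fun z => (z, curSpec x b d0 c M)) hbl
      rw [hB]
      exact ih (d0+1) (by omega) (by omega) _ _ (Or.inr ⟨by omega, by simp⟩)

theorem bruteforce_largest_cuboid_spec : Claim_equal_bruteforce_largest_cuboid := by
  intro x _ hPre
  unfold Spec_bruteforce_largest_cuboid bruteforce_largest_cuboid bruteforce_largest_cuboid_alt
  dsimp only
  have hrows : ∀ y ∈ x, (PySem.List.pyGetD x 0 []).length ≤ y.length := by
    intro y hy
    rw [pyGetD_zero_headD]
    exact hPre y hy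
  apply PySem.List.foldl_congr_mem
  intro accB B hBmem
  rw [PySem.List.mem_pyRange_one] at hBmem
  have hBeq : B = ((B.toNat : Nat) : Int) := (Int.toNat_of_nonneg hBmem.1).symm
  rw [hBeq]
  apply PySem.List.foldl_congr_mem
  intro accC C hCmem
  rw [PySem.List.mem_pyRange_one] at hCmem
  have hCeq : C = ((C.toNat : Nat) : Int) := (Int.toNat_of_nonneg hCmem.1).symm
  rw [hCeq]
  exact (loopD x (PySem.List.pyGetD x 0 []).length hrows B.toNat C.toNat
    (by omega) (by omega) x.length B.toNat (by omega) (by omega) accC [] (Or.inl rfl)).symm
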